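-- pv_equiv track=rewrite | github.com/MrBrantCode/unitest_baseline | mut_generate/mist_train_taco/taco_13678/solution.py | count_occurrences_in_pyramid_row
-- ===== SOURCE A (Python) =====
-- def count_occurrences_in_pyramid_row(S, T, N):
--     def kmp(s, t, lps):
--         n = len(s)
--         m = len(t)
--         count = [0 for x in range(n)]
--         i = 0
--         j = 0
--         while i < n:
--             count[i] = count[i - 1]
--             if t[j] == s[i]:
--                 i += 1
--                 j += 1
--             if j == m:
--                 count[i - 1] += 1
--                 j = lps[j - 1]
--             elif i < n and t[j] != s[i]:
--                 if j != 0: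
--                     j = lps[j - 1]
--                 else:
--                     i += 1
--         return count
--
--     def lpsa(t, m):
--         l = 0
--         lps = [0 for i in range(m)]
--         i = 1
--         while i < m:
--             if t[i] == t[l]:
--                 l += 1
--                 lps[i] = l
--                 i += 1
--             elif l != 0:
--                 l = lps[l - 1]
--             else:
--                 lps[i] = 0
--                 i += 1
--         return lps
--
--     n = len(S)
--     m = len(T)
--     lps = lpsa(T, m)
--     one = kmp(S, T, lps)[-1]
--     count = kmp(S + S, T, lps)
--     two = count[-1]
--     three = two - 2 * one
--
--     v = N // n
--     if v:
--         ans = v * one + (v - 1) * three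
--         e = N % n
--         ans += count[n - 1 + e] - count[n - 1]
--     else:
--         e = N % n
--         ans = count[e - 1]
--
--     return ans
-- ===== SOURCE B (Python) =====
-- def count_occurrences_in_pyramid_row(S, T, N):
--     n = len(S)
--     m = len(T)
--     s = S + S
--     # prefix-count array over S+S: pc[p] = occurrences of T in s ending at position <= p,
--     # built from an overlapping str.find scan instead of KMP
--     pc = [0] * (2 * n)
--     idx = s.find(T)
--     while idx != -1:
--         pc[idx + m - 1] += 1
--         idx = s.find(T, idx + 1)
--     for p in range(1, 2 * n):
--         pc[p] += pc[p - 1]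
--     one = pc[n - 1]
--     three = pc[2 * n - 1] - 2 * one
--     v, e = divmod(N, n)
--     if v:
--         return v * one + (v - 1) * three + pc[n - 1 + e] - one
--     return pc[e - 1]
-- ===== Notes on version B (the rewrite author's own statement) =====
-- stated objective: idiomatic
-- what changed: Replaces the hand-written KMP machinery (lpsa failure table + kmp prefix-count loops over S and S+S) by an overlapping str.find scan that marks match end positions in S+S and one prefix-sum pass, keeping the same period/boundary closed form and the same array indexing (including Python's pc[e-1] negative-index lookup), so B reproduces A exactly.
import Mathlib
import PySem

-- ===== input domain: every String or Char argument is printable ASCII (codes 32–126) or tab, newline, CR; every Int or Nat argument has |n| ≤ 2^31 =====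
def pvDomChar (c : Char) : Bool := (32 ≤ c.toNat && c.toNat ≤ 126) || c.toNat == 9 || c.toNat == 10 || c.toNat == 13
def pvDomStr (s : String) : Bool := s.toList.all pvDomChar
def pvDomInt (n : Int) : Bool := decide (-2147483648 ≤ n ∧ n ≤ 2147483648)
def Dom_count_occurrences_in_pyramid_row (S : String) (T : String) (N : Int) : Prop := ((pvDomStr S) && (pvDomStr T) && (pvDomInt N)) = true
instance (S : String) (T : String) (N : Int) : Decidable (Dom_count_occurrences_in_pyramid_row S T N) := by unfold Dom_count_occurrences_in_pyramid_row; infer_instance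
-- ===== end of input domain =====

-- B replaces A's hand-written KMP (failure table + prefix-count loops over S and S+S) by an
-- overlapping str.find scan marking match end positions in S+S plus one prefix-sum pass,
-- keeping the same period/boundary closed form and the same array indexing, so B equals A.

-- ===== PORT A =====
-- A.lpsa: while-loop transliterated with fuel 2*m (the loop measure 2*(m-i)+l shows ≤ 2*m iterations)
def pvLpsaGo (t : List Char) (m : Nat) : Nat → Nat → Nat → List Nat → List Nat
  | 0, _, _, lps => lps
  | fuel+1, l, i, lps =>
    if i < m then
      if t.getD i ' ' = t.getD l ' ' then
        pvLpsaGo t m fuel (l+1) (i+1) (lps.set i (l+1))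
      else if l ≠ 0 then
        pvLpsaGo t m fuel (lps.getD (l-1) 0) i lps
      else
        pvLpsaGo t m fuel l (i+1) (lps.set i 0)
    else lps

def pvLpsa (t : List Char) (m : Nat) : List Nat :=
  pvLpsaGo t m (2*m) 0 1 (List.replicate m 0)

-- A.kmp: while-loop transliterated with fuel 2*n+1 (measure 2*(n-i)+j+1); Python's count[i-1]
-- reads/writes with negative-index wraparound, kept via PySem pyGetD/pySetD on Int indices
def pvKmpGo (s t : List Char) (lps : List Nat) (n m : Nat) :
    Nat → Nat → Nat → List Int → List Int
  | 0, _, _, count => count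
  | fuel+1, i, j, count =>
    if i < n then
      let count1 := PySem.List.pySetD count (i:Int) (PySem.List.pyGetD count ((i:Int)-1) 0)
      let ij := if t.getD j ' ' = s.getD i ' ' then (i+1, j+1) else (i, j)
      if ij.2 = m then
        pvKmpGo s t lps n m fuel ij.1 (lps.getD (ij.2-1) 0)
          (PySem.List.pySetD count1 ((ij.1:Int)-1) (PySem.List.pyGetD count1 ((ij.1:Int)-1) 0 + 1))
      else if ij.1 < n ∧ t.getD ij.2 ' ' ≠ s.getD ij.1 ' ' then
        if ij.2 ≠ 0 then
          pvKmpGo s t lps n m fuel ij.1 (lps.getD (ij.2-1) 0) count1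
        else
          pvKmpGo s t lps n m fuel (ij.1+1) ij.2 count1
      else
        pvKmpGo s t lps n m fuel ij.1 ij.2 count1
    else count

def pvKmp (s t : List Char) (lps : List Nat) : List Int :=
  pvKmpGo s t lps s.length t.length (2*s.length+1) 0 0 (List.replicate s.length 0)

def count_occurrences_in_pyramid_row (S : String) (T : String) (N : Int) : Int :=
  let s := S.toList
  let t := T.toList
  let n := s.length
  let m := t.length
  let lps := pvLpsa t m
  let one := PySem.List.pyGetD (pvKmp s t lps) (-1) 0
  let count := pvKmp (s ++ s) t lps
  let two := PySem.List.pyGetD count (-1) 0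
  let three := two - 2*one
  let v := PySem.Int.floordiv N (n:Int)
  if v ≠ 0 then
    let e := PySem.Int.mod N (n:Int)
    v * one + (v-1) * three + (PySem.List.pyGetD count ((n:Int)-1+e) 0 - PySem.List.pyGetD count ((n:Int)-1) 0)
  else
    let e := PySem.Int.mod N (n:Int)
    PySem.List.pyGetD count (e-1) 0

-- ===== PORT B =====
-- Source B's pc[idx+m-1] += 1 (Python indexing, possibly negative)
def pvBump (pc : List Int) (e : Int) : List Int :=
  PySem.List.pySetD pc e (PySem.List.pyGetD pc e 0 + 1)

-- Source B's while loop over idx = s.find(T, idx+1), fuel 2*n+1 (idx strictly increases)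
def pvMarkEnds (s t : List Char) (m : Nat) : Nat → Int → List Int → List Int
  | 0, _, pc => pc
  | fuel+1, idx, pc =>
    if idx = -1 then pc
    else pvMarkEnds s t m fuel (PySem.Chars.findFrom s t (idx+1) none) (pvBump pc (idx + (m:Int) - 1))

-- Source B's `for p in range(1, 2*n): pc[p] += pc[p-1]` (indices 1..2n-1, all in range)
def pvPrefixSum (pc : List Int) (L : Nat) : List Int :=
  (List.range' 1 (L-1)).foldl (fun a p => a.set p (a.getD p 0 + a.getD (p-1) 0)) pc

def count_occurrences_in_pyramid_row_alt (S : String) (T : String) (N : Int) : Int :=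
  let n := S.toList.length
  let m := T.toList.length
  let s := S.toList ++ S.toList
  let pc1 := pvMarkEnds s T.toList m (2*n+1) (PySem.Chars.find s T.toList) (List.replicate (2*n) 0)
  let pc := pvPrefixSum pc1 (2*n)
  let one := pc.getD (n-1) 0
  let three := pc.getD (2*n-1) 0 - 2*one
  let v := PySem.Int.floordiv N (n:Int)
  let e := PySem.Int.mod N (n:Int)
  if v ≠ 0 then
    v * one + (v-1) * three + (PySem.List.pyGetD pc ((n:Int)-1+e) 0 - one)
  else
    PySem.List.pyGetD pc (e-1) 0

-- ===== PRECONDITION & SPEC =====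
-- Pre_ excludes exactly the inputs on which A raises: empty S (ZeroDivision/IndexError) or empty T (IndexError in kmp).
def Pre_count_occurrences_in_pyramid_row (S : String) (T : String) (N : Int) : Prop :=
  S.toList ≠ [] ∧ T.toList ≠ []
instance (S : String) (T : String) (N : Int) : Decidable (Pre_count_occurrences_in_pyramid_row S T N) := by
  unfold Pre_count_occurrences_in_pyramid_row; infer_instance

def pvWitness_count_occurrences_in_pyramid_row : String × String × Int := ("aba", "ab", 7)

def Spec_count_occurrences_in_pyramid_row (S : String) (T : String) (N : Int) (out : Int) : Prop :=
  out = count_occurrences_in_pyramid_row_alt S T N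
instance (S : String) (T : String) (N : Int) (out : Int) : Decidable (Spec_count_occurrences_in_pyramid_row S T N out) := by
  unfold Spec_count_occurrences_in_pyramid_row; infer_instance

-- ===== CLAIM =====
def Claim_equal_count_occurrences_in_pyramid_row : Prop := ∀ (S : String) (T : String) (N : Int), Dom_count_occurrences_in_pyramid_row S T N → Pre_count_occurrences_in_pyramid_row S T N → Spec_count_occurrences_in_pyramid_row S T N (count_occurrences_in_pyramid_row S T N)

-- ===== LEMMAS AND PROOFS =====

-- occurrence of t ending at position q of s
def pvOccB (s t : List Char) (q : Nat) : Bool := decide (t <:+ s.take (q+1))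

-- number of occurrences of t in s ending at a position < l
def pvPcount (s t : List Char) (l : Nat) : Nat := (List.range l).countP (pvOccB s t)

-- length of the longest proper border of t.take k
def pvMB (t : List Char) (k : Nat) : Nat :=
  Nat.findGreatest (fun b => t.take b <:+ t.take k) (k-1)

theorem pvTakeSucc (s : List Char) (i : Nat) (h : i < s.length) :
    s.take (i+1) = s.take i ++ [s[i]] := by
  simpa using (List.take_concat_get (l := s) (n := i) h).symm

theorem pvConcatSuffix (a b : List Char) (x y : Char) :
    (a ++ [x]) <:+ (b ++ [y]) ↔ a <:+ b ∧ x = y := by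
  rw [← List.reverse_prefix]
  simp only [List.reverse_append, List.reverse_singleton, List.singleton_append]
  rw [List.cons_prefix_cons]
  constructor
  · rintro ⟨h1, h2⟩; exact ⟨List.reverse_prefix.mp h2, h1⟩
  · rintro ⟨h1, h2⟩; exact ⟨h2, List.reverse_prefix.mpr h1⟩

-- one-character extension of a partial match
theorem pvStep (s t : List Char) (i k : Nat) (hi : i < s.length) (hk1 : 1 ≤ k) (hk2 : k ≤ t.length) :
    (t.take k <:+ s.take (i+1)) ↔
      (t.take (k-1) <:+ s.take i ∧ t.getD (k-1) ' ' = s.getD i ' ') := by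
  have hkl : k - 1 < t.length := by omega
  have ht : t.take k = t.take (k-1) ++ [t[k-1]] := by
    have h := pvTakeSucc t (k-1) hkl
    rw [show k - 1 + 1 = k by omega] at h
    exact h
  rw [List.getD_eq_getElem t ' ' hkl, List.getD_eq_getElem s ' ' hi, ht,
    pvTakeSucc s i hi, pvConcatSuffix]

theorem pvMB_lt (t : List Char) (k : Nat) (hk : 1 ≤ k) : pvMB t k < k :=
  lt_of_le_of_lt (Nat.findGreatest_le (k-1)) (by omega)

theorem pvMB_sfx (t : List Char) (k : Nat) : t.take (pvMB t k) <:+ t.take k :=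
  Nat.findGreatest_spec (P := fun b => t.take b <:+ t.take k) (Nat.zero_le (k-1)) (by simp)

theorem pvMB_ge (t : List Char) (k b : Nat) (hb : b < k) (h : t.take b <:+ t.take k) :
    b ≤ pvMB t k :=
  Nat.le_findGreatest (by omega) h

-- two partial matches ending at the same place nest: the shorter is a border of the longer
theorem pvNest (t w : List Char) (b l : Nat) (hbl : b < l) (hlm : l ≤ t.length)
    (hb : t.take b <:+ w) (hl : t.take l <:+ w) : b ≤ pvMB t l := by
  apply pvMB_ge t l b hbl
  exact List.suffix_of_suffix_length_le hb hl (by simp; omega)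

theorem pvPcount_succ (s t : List Char) (l : Nat) :
    pvPcount s t (l+1) = pvPcount s t l + (if pvOccB s t l then 1 else 0) := by
  by_cases h : pvOccB s t l <;>
    simp [pvPcount, List.range_succ, List.countP_append, List.countP_cons, h]

-- lpsa loop invariant: lps entries below i are correct failure-function values, l is a border
-- of t.take i, and every longer border of t.take i has already been rejected against t[i]
theorem pvLpsaGo_spec (t : List Char) (m : Nat) (hm : m = t.length) :
    ∀ fuel l i lps, 1 ≤ i → i ≤ m → l < i →
      lps.length = m →
      (∀ j, j < i → lps.getD j 0 = pvMB t (j+1)) →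
      (t.take l <:+ t.take i) →
      (∀ b, l < b → b < i → t.take b <:+ t.take i → i < m → t.getD b ' ' ≠ t.getD i ' ') →
      2*(m-i)+l+1 ≤ fuel →
      ∀ j, j < m → (pvLpsaGo t m fuel l i lps).getD j 0 = pvMB t (j+1) := by
  intro fuel
  induction fuel with
  | zero => intro l i lps _ _ _ _ _ _ _ hf; omega
  | succ fuel IH =>
    intro l i lps hi1 him hli hlen hok hsfx hrej hf j hj
    simp only [pvLpsaGo]
    by_cases hcase : i < m
    · have hiT : i < t.length := by omega
      simp only [if_pos hcase]
      by_cases hc : t.getD i ' ' = t.getD l ' '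
      · -- match: l+1 is the longest proper border of t.take (i+1)
        simp only [if_pos hc]
        have hb : t.take (l+1) <:+ t.take (i+1) := by
          rw [pvStep t t i (l+1) hiT (by omega) (by omega)]
          exact ⟨by simpa using hsfx, by simpa using hc.symm⟩
        have hmbi : pvMB t (i+1) = l + 1 := by
          have hge : l + 1 ≤ pvMB t (i+1) := pvMB_ge t (i+1) (l+1) (by omega) hb
          have hle : pvMB t (i+1) ≤ l + 1 := by
            by_contra hgt
            push_neg at hgt
            have hplt : pvMB t (i+1) < i + 1 := pvMB_lt t (i+1) (by omega)
            have hps : t.take (pvMB t (i+1)) <:+ t.take (i+1) := pvMB_sfx t (i+1)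
            rw [pvStep t t i (pvMB t (i+1)) hiT (by omega) (by omega)] at hps
            exact hrej (pvMB t (i+1) - 1) (by omega) (by omega) hps.1 hcase hps.2
          omega
        apply IH (l+1) (i+1) (lps.set i (l+1)) (by omega) (by omega) (by omega)
          (by simpa using hlen)
        · intro j' hj'
          rcases Nat.lt_or_ge j' i with h' | h'
          · rw [List.getD_eq_getElem?_getD, List.getElem?_set_ne (by omega),
              ← List.getD_eq_getElem?_getD]
            exact hok j' h'
          · have hji : j' = i := by omega
            subst hji
            rw [List.getD_eq_getElem?_getD, List.getElem?_set_self (by omega)]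
            simp [hmbi]
        · exact hb
        · intro b hb1 hb2 hbs _
          have : b ≤ pvMB t (i+1) := pvMB_ge t (i+1) b (by omega) hbs
          omega
        · omega
        · exact hj
      · simp only [if_neg hc]
        by_cases hl0 : l ≠ 0
        · -- mismatch, fall back to lps[l-1] = pvMB t l
          simp only [if_pos hl0]
          have hlv : lps.getD (l-1) 0 = pvMB t l := by
            have h := hok (l-1) (by omega)
            rw [show l - 1 + 1 = l by omega] at h
            exact h
          rw [hlv]
          have hmbl : pvMB t l < l := pvMB_lt t l (by omega)
          apply IH (pvMB t l) i lps hi1 him (by omega) hlen hok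
            ((pvMB_sfx t l).trans hsfx)
          · intro b hb1 hb2 hbs him2
            rcases Nat.lt_trichotomy b l with h' | h' | h'
            · exfalso
              have : b ≤ pvMB t l := pvNest t (t.take i) b l h' (by omega) hbs hsfx
              omega
            · subst h'
              exact fun he => hc he.symm
            · exact hrej b h' hb2 hbs him2
          · omega
          · exact hj
        · -- mismatch at l = 0: lps[i] = 0 is correct
          push_neg at hl0
          subst hl0
          rw [if_neg (by simp)]
          have hmbi : pvMB t (i+1) = 0 := by
            by_contra hne
            have hp1 : 1 ≤ pvMB t (i+1) := by omega
            have hplt : pvMB t (i+1) < i + 1 := pvMB_lt t (i+1) (by omega)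
            have hps := pvMB_sfx t (i+1)
            rw [pvStep t t i (pvMB t (i+1)) hiT (by omega) (by omega)] at hps
            rcases Nat.eq_or_lt_of_le hp1 with h1 | h1
            · have h0 : pvMB t (i+1) - 1 = 0 := by omega
              rw [h0] at hps
              exact hc hps.2.symm
            · exact hrej (pvMB t (i+1) - 1) (by omega) (by omega) hps.1 hcase hps.2
          apply IH 0 (i+1) (lps.set i 0) (by omega) (by omega) (by omega)
            (by simpa using hlen)
          · intro j' hj'
            rcases Nat.lt_or_ge j' i with h' | h'
            · rw [List.getD_eq_getElem?_getD, List.getElem?_set_ne (by omega),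
                ← List.getD_eq_getElem?_getD]
              exact hok j' h'
            · have hji : j' = i := by omega
              subst hji
              rw [List.getD_eq_getElem?_getD, List.getElem?_set_self (by omega)]
              simp [hmbi]
          · simp
          · intro b hb1 hb2 hbs _
            have : b ≤ pvMB t (i+1) := pvMB_ge t (i+1) b (by omega) hbs
            omega
          · omega
          · exact hj
    · -- i = m: loop exits, all entries are correct
      simp only [if_neg hcase]
      exact hok j (by omega)

theorem pvLpsa_getD (t : List Char) (ht : t ≠ []) (j : Nat) (hj : j < t.length) :
    (pvLpsa t t.length).getD j 0 = pvMB t (j+1) := by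
  have hm1 : 1 ≤ t.length := List.length_pos_iff.mpr ht
  apply pvLpsaGo_spec t t.length rfl (2*t.length) 0 1 (List.replicate t.length 0)
    le_rfl hm1 (by omega) (by simp)
  · intro j' hj'
    have h0 : j' = 0 := by omega
    subst h0
    rw [List.getD_eq_getElem?_getD, List.getElem?_replicate, if_pos (by omega)]
    simp [pvMB]
  · simp
  · intro b hb1 hb2; omega
  · omega
  · exact hj

theorem pvGetDSet (xs : List Int) (i p : Nat) (v : Int) (hi : i < xs.length) :
    (xs.set i v).getD p 0 = if p = i then v else xs.getD p 0 := by
  by_cases h : p = i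
  · subst h
    rw [List.getD_eq_getElem?_getD, List.getElem?_set_self hi, if_pos rfl]
    simp
  · rw [List.getD_eq_getElem?_getD, List.getElem?_set_ne (by omega), if_neg h,
      ← List.getD_eq_getElem?_getD]

theorem pvGetDRepl (n p : Nat) : (List.replicate n (0:Int)).getD p 0 = 0 := by
  rw [List.getD_eq_getElem?_getD, List.getElem?_replicate]
  split <;> simp

-- the first statement of A's kmp loop body: count[i] = count[i-1] writes pcount(i) into slot i
theorem pvCount1_spec (s t : List Char) (n i : Nat) (hi : i < n)
    (count : List Int) (hlen : count.length = n)
    (h1 : ∀ p, p < n → p < i → count.getD p 0 = (pvPcount s t (p+1) : Int))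
    (h2 : ∀ p, p < n → i < p → count.getD p 0 = 0)
    (h3 : count.getD i 0 = 0 ∨ count.getD i 0 = (pvPcount s t i : Int)) :
    PySem.List.pySetD count (i:Int) (PySem.List.pyGetD count ((i:Int)-1) 0)
      = count.set i ((pvPcount s t i : Int)) := by
  have hset : PySem.List.pySetD count (i:Int) (PySem.List.pyGetD count ((i:Int)-1) 0)
      = count.set i (PySem.List.pyGetD count ((i:Int)-1) 0) := by
    simp
  rw [hset]
  congr 1
  rcases Nat.eq_zero_or_pos i with h0 | h0
  · subst h0
    have hne : count ≠ [] := by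
      intro h; rw [h] at hlen; simp at hlen; omega
    have hp0 : pvPcount s t 0 = 0 := by simp [pvPcount]
    have hcast : ((0:Nat):Int) - 1 = -1 := by simp
    rw [hcast, PySem.List.pyGetD_neg_one (h := hne), List.getLast_eq_getElem hne]
    rcases Nat.eq_zero_or_pos (count.length - 1) with hl | hl
    · rw [← List.getD_eq_getElem (d := 0) count (by omega), hl]
      have hz : count.getD 0 0 = 0 := by
        rcases h3 with h | h
        · exact h
        · rw [h, hp0]; simp
      rw [hz, hp0]
      simp
    · rw [← List.getD_eq_getElem (d := 0) count (by omega)]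
      rw [h2 (count.length - 1) (by omega) (by omega), hp0]
      simp
  · have hcast : (i:Int) - 1 = ((i-1 : Nat) : Int) := by omega
    rw [hcast, PySem.List.pyGetD_natCast]
    have := h1 (i-1) (by omega) (by omega)
    rw [show i - 1 + 1 = i by omega] at this
    simpa using this

theorem pvPcount_succ_T (s t : List Char) (l : Nat) (h : pvOccB s t l = true) :
    (pvPcount s t (l+1) : Int) = (pvPcount s t l : Int) + 1 := by
  rw [pvPcount_succ, h]
  push_cast
  simp

theorem pvPcount_succ_F (s t : List Char) (l : Nat) (h : pvOccB s t l = false) :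
    (pvPcount s t (l+1) : Int) = (pvPcount s t l : Int) := by
  rw [pvPcount_succ, h]
  push_cast
  simp

-- kmp loop invariant: counts below i are final, j is a partial match (border-chain state) and
-- every longer partial match ending at i has already been rejected against s[i]
theorem pvKmpGo_spec (s t : List Char) (lps : List Nat) (n m : Nat)
    (hn : n = s.length) (hm : m = t.length) (hm1 : 1 ≤ m)
    (hlps : ∀ j, j < m → lps.getD j 0 = pvMB t (j+1)) :
    ∀ fuel i j count, i ≤ n → j < m → j ≤ i →
      count.length = n →
      (∀ p, p < n → p < i → count.getD p 0 = (pvPcount s t (p+1) : Int)) →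
      (∀ p, p < n → i < p → count.getD p 0 = 0) →
      (i < n → count.getD i 0 = 0 ∨ count.getD i 0 = (pvPcount s t i : Int)) →
      t.take j <:+ s.take i →
      (∀ k, j < k → k < m → t.take k <:+ s.take i → i < n → t.getD k ' ' ≠ s.getD i ' ') →
      2*(n-i)+j+1 ≤ fuel →
      (pvKmpGo s t lps n m fuel i j count).length = n ∧
      ∀ p, p < n → (pvKmpGo s t lps n m fuel i j count).getD p 0 = (pvPcount s t (p+1) : Int) := by
  intro fuel
  induction fuel with
  | zero => intro i j count _ _ _ _ _ _ _ _ _ hf; omega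
  | succ fuel IH =>
    intro i j count hi hjm hji hlen h1 h2 h3 hsfx hrej hf
    simp only [pvKmpGo]
    by_cases hin : i < n
    · simp only [if_pos hin]
      have hiS : i < s.length := by omega
      rw [pvCount1_spec s t n i hin count hlen h1 h2 (h3 hin)]
      have hC1len : (count.set i ((pvPcount s t i : Int))).length = n := by
        simpa using hlen
      have hC1get : ∀ p, (count.set i ((pvPcount s t i : Int))).getD p 0 =
          if p = i then (pvPcount s t i : Int) else count.getD p 0 :=
        fun p => pvGetDSet count i p _ (by omega)
      by_cases hc : t.getD j ' ' = s.getD i ' '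
      · -- characters match: i and j advance
        simp only [if_pos hc]
        have hsfx1 : t.take (j+1) <:+ s.take (i+1) := by
          rw [pvStep s t i (j+1) hiS (by omega) (by omega)]
          exact ⟨by simpa using hsfx, by simpa using hc⟩
        by_cases hjm1 : j + 1 = m
        · -- full match: count the occurrence ending at i
          simp only [hjm1, if_pos]
          have htfull : t <:+ s.take (i+1) := by
            have := hsfx1
            rw [hjm1, hm, List.take_length] at this
            exact this
          have hocc : pvOccB s t i = true := decide_eq_true htfull
          have hj2 : lps.getD (m-1) 0 = pvMB t m := by
            have h := hlps (m-1) (by omega)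
            rw [show m - 1 + 1 = m by omega] at h
            exact h
          have hmb : pvMB t m < m := pvMB_lt t m hm1
          have hwrite : PySem.List.pySetD (count.set i ((pvPcount s t i : Int)))
              (((i+1 : Nat) : Int) - 1)
              (PySem.List.pyGetD (count.set i ((pvPcount s t i : Int))) (((i+1 : Nat) : Int) - 1) 0 + 1)
              = count.set i ((pvPcount s t (i+1) : Int)) := by
            have hcast : ((i+1 : Nat) : Int) - 1 = (i : Int) := by omega
            rw [hcast, PySem.List.pySetD_natCast, PySem.List.pyGetD_natCast]
            rw [List.set_set]
            congr 1
            rw [show (count.set i ((pvPcount s t i : Int))).getD i 0 = (pvPcount s t i : Int) by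
              rw [hC1get]; simp]
            rw [pvPcount_succ_T s t i hocc]
          rw [hwrite, hj2]
          apply IH (i+1) (pvMB t m) (count.set i ((pvPcount s t (i+1) : Int)))
            (by omega) (by omega) (by omega) (by simpa using hlen)
          · intro p hp hpi
            rw [pvGetDSet count i p _ (by omega)]
            rcases Nat.lt_or_ge p i with h' | h'
            · rw [if_neg (by omega)]; exact h1 p hp h'
            · rw [if_pos (by omega), show p = i by omega]
          · intro p hp hpi
            rw [pvGetDSet count i p _ (by omega), if_neg (by omega)]
            exact h2 p hp (by omega)
          · intro hp
            rw [pvGetDSet count i _ _ (by omega), if_neg (by omega)]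
            exact Or.inl (h2 (i+1) hp (by omega))
          · refine List.IsSuffix.trans ?_ htfull
            have h5 := pvMB_sfx t m
            rwa [show t.take m = t by rw [hm, List.take_length]] at h5
          · intro k hk1 hk2 hks _
            exfalso
            have hkt : t.take k <:+ t := by
              apply List.suffix_of_suffix_length_le hks htfull
              simp
            have : k ≤ pvMB t m := by
              apply pvMB_ge t m k (by omega)
              rw [hm, List.take_length]
              exact hkt
            omega
          · omega
        · -- partial match continues (j+1 < m)
          have hj1m : j + 1 < m := by omega
          simp only [if_neg hjm1]
          have hnocc : pvOccB s t i = false := by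
            apply decide_eq_false
            intro hoc
            have hoc' : t.take m <:+ s.take (i+1) := by rwa [hm, List.take_length]
            rw [pvStep s t i m hiS (by omega) (by omega)] at hoc'
            exact hrej (m-1) (by omega) (by omega) hoc'.1 hin hoc'.2
          have hrejN : ∀ k, j+1 < k → k < m → ¬ t.take k <:+ s.take (i+1) := by
            intro k hk1 hk2 hks
            rw [pvStep s t i k hiS (by omega) (by omega)] at hks
            exact hrej (k-1) (by omega) (by omega) hks.1 hin hks.2
          have h1' : ∀ p, p < n → p < i+1 →
              (count.set i ((pvPcount s t i : Int))).getD p 0 = (pvPcount s t (p+1) : Int) := by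
            intro p hp hpi
            rw [hC1get]
            rcases Nat.lt_or_ge p i with h' | h'
            · rw [if_neg (by omega)]; exact h1 p hp h'
            · rw [if_pos (by omega), show p = i by omega]
              rw [pvPcount_succ_F s t i hnocc]
          have h2' : ∀ p, p < n → i+1 < p →
              (count.set i ((pvPcount s t i : Int))).getD p 0 = 0 := by
            intro p hp hpi
            rw [hC1get, if_neg (by omega)]
            exact h2 p hp (by omega)
          have h3' : i+1 < n →
              (count.set i ((pvPcount s t i : Int))).getD (i+1) 0 = 0 ∨
              (count.set i ((pvPcount s t i : Int))).getD (i+1) 0 = (pvPcount s t (i+1) : Int) := by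
            intro hp
            rw [hC1get, if_neg (by omega)]
            exact Or.inl (h2 (i+1) hp (by omega))
          by_cases hel : i+1 < n ∧ t.getD (j+1) ' ' ≠ s.getD (i+1) ' '
          · simp only [if_pos hel]
            rw [if_pos (by omega)]
            have hj2 : lps.getD (j+1-1) 0 = pvMB t (j+1) := by
              simpa using hlps j (by omega)
            rw [hj2]
            have hmb : pvMB t (j+1) < j+1 := pvMB_lt t (j+1) (by omega)
            apply IH (i+1) (pvMB t (j+1)) _ (by omega) (by omega) (by omega)
              (by simpa using hlen) h1' h2' h3'
            · exact (pvMB_sfx t (j+1)).trans hsfx1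
            · intro k hk1 hk2 hks _
              rcases Nat.lt_trichotomy k (j+1) with h' | h' | h'
              · exfalso
                have : k ≤ pvMB t (j+1) := pvNest t (s.take (i+1)) k (j+1) h' (by omega) hks hsfx1
                omega
              · subst h'
                exact hel.2
              · exact absurd hks (hrejN k h' hk2)
            · omega
          · simp only [if_neg hel]
            apply IH (i+1) (j+1) _ (by omega) (by omega) (by omega)
              (by simpa using hlen) h1' h2' h3' hsfx1
            · intro k hk1 hk2 hks _
              exact absurd hks (hrejN k hk1 hk2)
            · omega
      · -- characters differ: i and j stay, then the elif fires
        simp only [if_neg hc]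
        rw [if_neg (by omega)]
        rw [if_pos (by exact ⟨hin, hc⟩)]
        have h1' : ∀ p, p < n → p < i →
            (count.set i ((pvPcount s t i : Int))).getD p 0 = (pvPcount s t (p+1) : Int) := by
          intro p hp hpi
          rw [hC1get, if_neg (by omega)]
          exact h1 p hp hpi
        have h2' : ∀ p, p < n → i < p →
            (count.set i ((pvPcount s t i : Int))).getD p 0 = 0 := by
          intro p hp hpi
          rw [hC1get, if_neg (by omega)]
          exact h2 p hp hpi
        by_cases hj0 : j ≠ 0
        · simp only [if_pos hj0]
          have hj2 : lps.getD (j-1) 0 = pvMB t j := by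
            have h := hlps (j-1) (by omega)
            rw [show j - 1 + 1 = j by omega] at h
            exact h
          rw [hj2]
          have hmb : pvMB t j < j := pvMB_lt t j (by omega)
          apply IH i (pvMB t j) _ (by omega) (by omega) (by omega)
            (by simpa using hlen) h1' h2'
          · intro hp
            rw [hC1get, if_pos rfl]
            exact Or.inr rfl
          · exact (pvMB_sfx t j).trans hsfx
          · intro k hk1 hk2 hks hlt
            rcases Nat.lt_trichotomy k j with h' | h' | h'
            · exfalso
              have : k ≤ pvMB t j := pvNest t (s.take i) k j h' (by omega) hks hsfx
              omega
            · subst h'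
              exact hc
            · exact hrej k h' hk2 hks hlt
          · omega
        · simp only [if_neg hj0]
          push_neg at hj0
          subst hj0
          have hnocc : pvOccB s t i = false := by
            apply decide_eq_false
            intro hoc
            have hoc' : t.take m <:+ s.take (i+1) := by rwa [hm, List.take_length]
            rw [pvStep s t i m hiS (by omega) (by omega)] at hoc'
            rcases Nat.eq_zero_or_pos (m-1) with h0 | h0
            · rw [h0] at hoc'
              exact hc hoc'.2
            · exact hrej (m-1) (by omega) (by omega) hoc'.1 hin hoc'.2
          apply IH (i+1) 0 _ (by omega) (by omega) (by omega)
            (by simpa using hlen)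
          · intro p hp hpi
            rw [hC1get]
            rcases Nat.lt_or_ge p i with h' | h'
            · rw [if_neg (by omega)]; exact h1 p hp h'
            · rw [if_pos (by omega), show p = i by omega]
              rw [pvPcount_succ_F s t i hnocc]
          · intro p hp hpi
            rw [hC1get, if_neg (by omega)]
            exact h2 p hp (by omega)
          · intro hp
            rw [hC1get, if_neg (by omega)]
            exact Or.inl (h2 (i+1) hp (by omega))
          · simp
          · intro k hk1 hk2 hks _
            exfalso
            rw [pvStep s t i k hiS (by omega) (by omega)] at hks
            rcases Nat.eq_zero_or_pos (k-1) with h0 | h0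
            · rw [h0] at hks
              exact hc hks.2
            · exact hrej (k-1) (by omega) (by omega) hks.1 hin hks.2
          · omega
    · -- loop exit: i = n, counts are final
      simp only [if_neg hin]
      exact ⟨hlen, fun p hp => h1 p hp (by omega)⟩

theorem pvKmp_spec (s t : List Char) (ht : t ≠ []) :
    pvKmp s t (pvLpsa t t.length) =
      (List.range s.length).map (fun p => (pvPcount s t (p+1) : Int)) := by
  have hm1 : 1 ≤ t.length := List.length_pos_iff.mpr ht
  have hmain := pvKmpGo_spec s t (pvLpsa t t.length) s.length t.length rfl rfl hm1
      (fun j hj => pvLpsa_getD t ht j hj) (2*s.length+1) 0 0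
      (List.replicate s.length 0) (Nat.zero_le _) (by omega) le_rfl
      (by simp) (by omega) (fun p hp hpi => pvGetDRepl _ _)
      (fun _ => Or.inl (pvGetDRepl _ _)) (by simp)
      (by
        intro k hk1 hk2 hks _
        exfalso
        have h0 : k = 0 ∨ t = [] := by simpa using hks
        rcases h0 with h0 | h0
        · omega
        · have hL : t.length = 0 := by rw [h0]; rfl
          omega)
      (by omega)
  unfold pvKmp
  apply List.ext_getElem
  · rw [hmain.1]; simp
  · intro p hp1 hp2
    have hpn : p < s.length := by simpa using hp2
    rw [← List.getD_eq_getElem (d := 0) _ hp1, hmain.2 p hpn]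
    simp

theorem pvFilterCons (P : Nat → Bool) (k j0 : Nat) (xs : List Nat)
    (hpw : xs.Pairwise (· < ·)) (hmem : j0 ∈ xs) (hk : k ≤ j0) (hPj : P j0 = true)
    (hmin : ∀ i, k ≤ i → i < j0 → P i = false) :
    xs.filter (fun j => decide (k ≤ j) && P j)
      = j0 :: xs.filter (fun j => decide (j0+1 ≤ j) && P j) := by
  induction xs with
  | nil => simp at hmem
  | cons x xs IH =>
    rcases List.pairwise_cons.mp hpw with ⟨hx, hpw'⟩
    rcases List.mem_cons.mp hmem with he | hmem'
    · subst he
      rw [List.filter_cons, List.filter_cons]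
      rw [if_pos (by simp [hk, hPj]), if_neg (by simp)]
      congr 1
      apply List.filter_congr
      intro y hy
      have hxy : j0 < y := hx y hy
      simp [show k ≤ y by omega, show j0 + 1 ≤ y by omega]
    · have hxj : x < j0 := hx j0 hmem'
      rw [List.filter_cons, List.filter_cons]
      have c1 : (decide (k ≤ x) && P x) = false := by
        by_cases hkx : k ≤ x
        · simp [hkx, hmin x hkx hxj]
        · simp [hkx]
      rw [if_neg (by simp [c1]), if_neg (by simp; omega)]
      exact IH hpw' hmem'

-- the Source B find loop bumps exactly the occurrence end positions for starts ≥ k, in order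
theorem pvMarkEnds_go (s t : List Char) (ht : t ≠ []) :
    ∀ fuel k pc, k ≤ s.length → s.length + 1 - k ≤ fuel →
      pvMarkEnds s t t.length fuel (PySem.Chars.findFrom s t (k:Int) none) pc =
        (((List.range s.length).filter
            (fun j => decide (k ≤ j) && decide (t <+: s.drop j))).map
            (fun j : Nat => (j:Int) + t.length - 1)).foldl pvBump pc := by
  intro fuel
  induction fuel with
  | zero => intro k pc hk hf; omega
  | succ fuel IH =>
    intro k pc hk hf
    rw [PySem.Chars.findFrom_natCast s t k hk]
    by_cases hfind : PySem.Chars.find (s.drop k) t = -1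
    · rw [if_pos hfind]
      have hni : ¬ t <:+: s.drop k := (PySem.Chars.find_eq_neg_one_iff _ _).mp hfind
      have hfil : (List.range s.length).filter
          (fun j => decide (k ≤ j) && decide (t <+: s.drop j)) = [] := by
        rw [List.filter_eq_nil_iff]
        intro j hj hpred
        simp only [Bool.and_eq_true, decide_eq_true_eq] at hpred
        apply hni
        have hdd : s.drop j = (s.drop k).drop (j - k) := by
          rw [List.drop_drop]
          congr 1
          omega
        exact ((hdd ▸ hpred.2).isInfix).trans (List.drop_suffix _ _).isInfix
      rw [hfil]
      simp [pvMarkEnds]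
    · rw [if_neg hfind]
      have hf0 : 0 ≤ PySem.Chars.find (s.drop k) t := by
        have := PySem.Chars.neg_one_le_find (s.drop k) t
        omega
      have hspec := PySem.Chars.find_spec (s := s.drop k) (sub := t) hf0
      have hj0pre : t <+: s.drop (k + (PySem.Chars.find (s.drop k) t).toNat) := by
        have h := hspec.1
        rwa [List.drop_drop] at h
      have hj0L : k + (PySem.Chars.find (s.drop k) t).toNat < s.length := by
        by_contra hge
        push_neg at hge
        have hnil : s.drop (k + (PySem.Chars.find (s.drop k) t).toNat) = [] :=
          List.drop_eq_nil_of_le hge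
        rw [hnil, List.prefix_nil] at hj0pre
        exact ht hj0pre
      simp only [pvMarkEnds]
      rw [if_neg (by omega)]
      have hcast : (k:Int) + PySem.Chars.find (s.drop k) t + 1
          = ((k + (PySem.Chars.find (s.drop k) t).toNat + 1 : Nat) : Int) := by
        omega
      rw [hcast, IH (k + (PySem.Chars.find (s.drop k) t).toNat + 1) _ (by omega) (by omega)]
      rw [pvFilterCons (fun j => decide (t <+: s.drop j)) k
        (k + (PySem.Chars.find (s.drop k) t).toNat) (List.range s.length)
        List.pairwise_lt_range (List.mem_range.mpr hj0L) (by omega)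
        (by simp [hj0pre])
        (by
          intro i hki hij0
          apply decide_eq_false
          intro hpre
          have hdd : s.drop i = (s.drop k).drop (i - k) := by
            rw [List.drop_drop]
            congr 1
            omega
          exact hspec.2 (i - k) (by omega) (hdd ▸ hpre))]
      simp only [List.map_cons, List.foldl_cons]
      congr 2
      omega

-- occurrence ending at q ↔ occurrence starting at q+1-|t|
theorem pvOccIff (s t : List Char) (ht : t ≠ []) (q : Nat) (hq : q < s.length) :
    pvOccB s t q = true ↔ ∃ j, j + t.length = q + 1 ∧ t <+: s.drop j := by
  simp only [pvOccB, decide_eq_true_eq]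
  constructor
  · intro h
    have hm : t.length ≤ q + 1 := by
      have hle := h.length_le
      simp at hle
      omega
    refine ⟨q + 1 - t.length, by omega, ?_⟩
    have hsplit : s.take (q+1) = s.take (q+1 - t.length) ++ (s.drop (q+1 - t.length)).take t.length := by
      rw [← List.take_add]
      congr 1
      omega
    rw [hsplit] at h
    have hBlen : ((s.drop (q+1 - t.length)).take t.length).length = t.length := by
      simp
      omega
    have hsfxB : t <:+ (s.drop (q+1 - t.length)).take t.length :=
      List.suffix_of_suffix_length_le h (List.suffix_append _ _) (by rw [hBlen])
    have heq : t = (s.drop (q+1 - t.length)).take t.length :=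
      List.IsSuffix.eq_of_length hsfxB (by rw [hBlen])
    exact List.prefix_iff_eq_take.mpr heq
  · rintro ⟨j, hj, hpre⟩
    have ht' : t = (s.drop j).take t.length := List.prefix_iff_eq_take.mp hpre
    have hsplit : s.take (q+1) = s.take j ++ (s.drop j).take t.length := by
      rw [← List.take_add]
      congr 1
      omega
    rw [hsplit, ← ht']
    exact List.suffix_append _ _

-- bumping a list of in-range indices adds the multiplicity of each index
theorem pvFoldBump_getD (es : List Int) :
    ∀ pc : List Int, (∀ e ∈ es, 0 ≤ e ∧ e.toNat < pc.length) →
      (es.foldl pvBump pc).length = pc.length ∧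
      ∀ q : Nat, q < pc.length →
        (es.foldl pvBump pc).getD q 0 = pc.getD q 0 + (es.count (q:Int) : Int) := by
  induction es with
  | nil => intro pc _; exact ⟨rfl, fun q _ => by simp⟩
  | cons e es IH =>
    intro pc hrange
    rcases hrange e (by simp) with ⟨he0, heL⟩
    have hbump : pvBump pc e = pc.set e.toNat (pc.getD e.toNat 0 + 1) := by
      unfold pvBump
      conv_lhs => rw [show e = ((e.toNat : Nat) : Int) by omega]
      rw [PySem.List.pySetD_natCast, PySem.List.pyGetD_natCast]
    have hlen : (pvBump pc e).length = pc.length := by rw [hbump]; simp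
    have hIH := IH (pvBump pc e) (by
      intro x hx
      rw [hlen]
      exact hrange x (by simp [hx]))
    refine ⟨by rw [List.foldl_cons]; rw [hIH.1]; exact hlen, ?_⟩
    intro q hq
    rw [List.foldl_cons, hIH.2 q (by rw [hlen]; exact hq), hbump,
      pvGetDSet pc e.toNat q _ heL]
    by_cases hqe : (q:Int) = e
    · rw [if_pos (show q = e.toNat by omega)]
      have hc : (e :: es).count (q:Int) = es.count (q:Int) + 1 := by
        simp [List.count_cons, hqe]
      rw [hc]
      have hgq : pc.getD e.toNat 0 = pc.getD q 0 := by
        congr 1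
        omega
      rw [hgq]
      push_cast
      ring
    · rw [if_neg (show ¬ q = e.toNat by omega)]
      have hc : (e :: es).count (q:Int) = es.count (q:Int) := by
        simp [List.count_cons]
        omega
      rw [hc]

-- after the mark loop, slot q holds the 0/1 indicator of an occurrence ending at q
theorem pvMark_spec (s t : List Char) (ht : t ≠ []) (q : Nat) (hq : q < s.length) :
    (pvMarkEnds s t t.length (s.length+1) (PySem.Chars.find s t)
        (List.replicate s.length 0)).getD q 0
      = (if pvOccB s t q then 1 else 0) ∧
    (pvMarkEnds s t t.length (s.length+1) (PySem.Chars.find s t)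
        (List.replicate s.length 0)).length = s.length := by
  have hm1 : 1 ≤ t.length := List.length_pos_iff.mpr ht
  have h0 := pvMarkEnds_go s t ht (s.length+1) 0 (List.replicate s.length 0) (by omega) (by omega)
  simp only [Nat.cast_zero, PySem.Chars.findFrom_zero, Nat.zero_le, decide_true,
    Bool.true_and] at h0
  set es := ((List.range s.length).filter (fun j => decide (t <+: s.drop j))).map
      (fun j : Nat => (j:Int) + t.length - 1) with hes
  have hrange : ∀ e ∈ es, 0 ≤ e ∧ e.toNat < (List.replicate s.length (0:Int)).length := by
    intro e hme
    rw [hes] at hme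
    rcases List.mem_map.mp hme with ⟨j, hj, hje⟩
    rcases List.mem_filter.mp hj with ⟨hjr, hjp⟩
    have hjpre : t <+: s.drop j := of_decide_eq_true hjp
    have hjm : j + t.length ≤ s.length := by
      have h1 := hjpre.length_le
      simp at h1
      omega
    subst hje
    constructor
    · omega
    · simp only [List.length_replicate]
      omega
  have hfb := pvFoldBump_getD es (List.replicate s.length 0) hrange
  rw [h0]
  refine ⟨?_, by rw [hfb.1]; simp⟩
  rw [hfb.2 q (by simp [hq]), pvGetDRepl]
  have hnd : es.Nodup := by
    rw [hes]
    apply List.Nodup.map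
    · intro a b hab
      simp only at hab
      omega
    · exact (List.nodup_range).filter _
  have hmemiff : (q:Int) ∈ es ↔ pvOccB s t q = true := by
    rw [hes]
    constructor
    · intro hm
      rcases List.mem_map.mp hm with ⟨j, hj, hje⟩
      rcases List.mem_filter.mp hj with ⟨hjr, hjp⟩
      have hjpre : t <+: s.drop j := of_decide_eq_true hjp
      rw [pvOccIff s t ht q hq]
      exact ⟨j, by omega, hjpre⟩
    · intro hocc
      rcases (pvOccIff s t ht q hq).mp hocc with ⟨j, hj, hpre⟩
      apply List.mem_map.mpr
      refine ⟨j, List.mem_filter.mpr ⟨List.mem_range.mpr (by omega), by simp [hpre]⟩, by omega⟩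
  by_cases hocc : pvOccB s t q = true
  · rw [if_pos hocc, List.count_eq_one_of_mem hnd (hmemiff.mpr hocc)]
    simp
  · rw [if_neg (by simp [hocc]), List.count_eq_zero_of_not_mem (by
      intro hm
      exact hocc (hmemiff.mp hm))]
    simp

-- prefix-sum loop invariant
theorem pvPrefixGo (base : Nat → Int) :
    ∀ (k : Nat) (pc : List Int), (∀ p < pc.length, pc.getD p 0 = if p ≤ k then
        ((List.range (p+1)).map base).sum else base p) →
      k + 1 ≤ pc.length → ∀ kk, k + 1 + kk ≤ pc.length →
      ((List.range' (k+1) kk).foldl (fun a p => a.set p (a.getD p 0 + a.getD (p-1) 0)) pc).length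
        = pc.length ∧
      ∀ p < pc.length,
        ((List.range' (k+1) kk).foldl (fun a p => a.set p (a.getD p 0 + a.getD (p-1) 0)) pc).getD p 0
          = if p ≤ k + kk then ((List.range (p+1)).map base).sum else base p := by
  intro k pc hinv hk kk
  induction kk generalizing k pc with
  | zero =>
    intro _
    refine ⟨by simp, ?_⟩
    intro p hp
    have h := hinv p hp
    rw [show k + 0 = k from rfl]
    simpa using h
  | succ kk IH =>
    intro hkk
    rw [List.range'_succ, List.foldl_cons]
    have hset : (pc.set (k+1) (pc.getD (k+1) 0 + pc.getD (k+1-1) 0)).length = pc.length := by simp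
    have hnew : ∀ p < pc.length,
        (pc.set (k+1) (pc.getD (k+1) 0 + pc.getD (k+1-1) 0)).getD p 0
          = if p ≤ k+1 then ((List.range (p+1)).map base).sum else base p := by
      intro p hp
      rw [pvGetDSet pc (k+1) p _ (by omega)]
      by_cases hpe : p = k+1
      · subst hpe
        rw [if_pos rfl, if_pos le_rfl]
        rw [hinv (k+1) hp, if_neg (by omega),
          show k+1-1 = k by omega, hinv k (by omega), if_pos le_rfl]
        rw [List.range_succ (n := k+1)]
        simp only [List.map_append, List.sum_append, List.map_cons, List.map_nil]
        simp
        ring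
      · rw [if_neg hpe]
        rcases Nat.lt_or_ge p (k+1) with h' | h'
        · rw [hinv p hp, if_pos (by omega), if_pos (by omega)]
        · rw [hinv p hp, if_neg (by omega), if_neg (by omega)]
    have := IH (k+1) (pc.set (k+1) (pc.getD (k+1) 0 + pc.getD (k+1-1) 0))
      (by rw [hset]; exact hnew) (by rw [hset]; omega) (by rw [hset]; omega)
    rw [hset] at this
    refine ⟨this.1, ?_⟩
    intro p hp
    rw [this.2 p hp]
    congr 2
    omega

-- the indicator prefix sum is the occurrence count
theorem pvIndSum (s t : List Char) (p : Nat) :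
    ((List.range (p+1)).map (fun q => if pvOccB s t q then (1:Int) else 0)).sum
      = (pvPcount s t (p+1) : Int) := by
  induction p with
  | zero => simp [pvPcount_succ, pvPcount]
  | succ p IH =>
    have hr : List.range (p+1+1) = List.range (p+1) ++ [p+1] := List.range_succ
    rw [hr, List.map_append, List.sum_append, IH, pvPcount_succ s t (p+1)]
    by_cases h : pvOccB s t (p+1) <;> simp [h] <;> push_cast <;> ring

-- B's pc array equals the prefix-count map (A's kmp output over S+S)
theorem pvPc_spec (s t : List Char) (ht : t ≠ []) (fuel : Nat) (hf : s.length + 1 ≤ fuel)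
    (hs1 : 1 ≤ s.length) :
    pvPrefixSum (pvMarkEnds s t t.length fuel (PySem.Chars.find s t)
        (List.replicate s.length 0)) s.length
      = (List.range s.length).map (fun p => (pvPcount s t (p+1) : Int)) := by
  have hfeq : pvMarkEnds s t t.length fuel (PySem.Chars.find s t) (List.replicate s.length 0)
      = pvMarkEnds s t t.length (s.length+1) (PySem.Chars.find s t) (List.replicate s.length 0) := by
    have h1 := pvMarkEnds_go s t ht fuel 0 (List.replicate s.length 0) (by omega) (by omega)
    have h2 := pvMarkEnds_go s t ht (s.length+1) 0 (List.replicate s.length 0) (by omega) (by omega)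
    simp only [Nat.cast_zero, PySem.Chars.findFrom_zero] at h1 h2
    rw [h1, h2]
  rw [hfeq]
  set pc1 := pvMarkEnds s t t.length (s.length+1) (PySem.Chars.find s t)
      (List.replicate s.length 0) with hpc1
  have hlen1 : pc1.length = s.length := (pvMark_spec s t ht 0 (by omega)).2
  have hbase : ∀ q < pc1.length, pc1.getD q 0 = if pvOccB s t q then 1 else 0 := by
    intro q hq
    exact (pvMark_spec s t ht q (by omega)).1
  have hinv0 : ∀ p < pc1.length, pc1.getD p 0 = if p ≤ 0 then
      ((List.range (p+1)).map (fun q => if pvOccB s t q then (1:Int) else 0)).sum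
        else (fun q => if pvOccB s t q then (1:Int) else 0) p := by
    intro p hp
    by_cases h0 : p = 0
    · subst h0
      rw [hbase 0 hp]
      simp
    · rw [if_neg (show ¬ p ≤ 0 by omega)]
      exact hbase p hp
  have hmain := pvPrefixGo (fun q => if pvOccB s t q then (1:Int) else 0) 0 pc1 hinv0
    (by omega) (s.length - 1) (by omega)
  unfold pvPrefixSum
  rw [hlen1] at hmain
  rw [show (0:Nat)+1 = 1 by rfl] at hmain
  apply List.ext_getElem
  · rw [hmain.1]
    simp
  · intro p hp1 hp2
    have hpn : p < s.length := by simpa using hp2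
    rw [← List.getD_eq_getElem (d := 0) _ hp1, hmain.2 p (by omega),
      if_pos (by omega), pvIndSum]
    simp

theorem pvMapRangeGetD (f : Nat → Int) (n p : Nat) (hp : p < n) :
    ((List.range n).map f).getD p 0 = f p := by
  rw [List.getD_eq_getElem _ _ (by simpa using hp)]
  simp

theorem pvMapRangeLast (f : Nat → Int) (n : Nat) (hn : 1 ≤ n) :
    PySem.List.pyGetD ((List.range n).map f) (-1) 0 = f (n - 1) := by
  have hne : (List.range n).map f ≠ [] := by simp; omega
  rw [PySem.List.pyGetD_neg_one (h := hne), List.getLast_eq_getElem hne]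
  simp

theorem pvPcount_prefix (s t : List Char) (l : Nat) (hl : l ≤ s.length) :
    pvPcount (s ++ s) t l = pvPcount s t l := by
  unfold pvPcount
  apply List.countP_congr
  intro q hq
  have hql : q < l := List.mem_range.mp hq
  unfold pvOccB
  rw [List.take_append_of_le_length (by omega)]

-- ===== VERDICT (by name: the statement is the Claim_ definition above) =====
theorem count_occurrences_in_pyramid_row_spec : Claim_equal_count_occurrences_in_pyramid_row := by
  intro S T N hdom hpre
  rcases hpre with ⟨hS, hT⟩
  have hn1 : 1 ≤ S.toList.length := List.length_pos_iff.mpr hS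
  have hm1 : 1 ≤ T.toList.length := List.length_pos_iff.mpr hT
  have hs2 : (S.toList ++ S.toList).length = 2 * S.toList.length := by
    simp
    omega
  have hn2 : 1 ≤ (S.toList ++ S.toList).length := by omega
  have hK1 := pvKmp_spec S.toList T.toList hT
  have hK2 := pvKmp_spec (S.toList ++ S.toList) T.toList hT
  have hPC := pvPc_spec (S.toList ++ S.toList) T.toList hT ((S.toList ++ S.toList).length + 1)
    (by omega) (by omega)
  have hnpos : (0:Int) < (S.toList.length : Int) := by exact_mod_cast hn1
  have he0 : 0 ≤ PySem.Int.mod N (S.toList.length : Int) := by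
    rw [PySem.Int.mod_eq_emod_of_pos hnpos]
    exact Int.emod_nonneg N (by omega)
  have he1 : PySem.Int.mod N (S.toList.length : Int) < (S.toList.length : Int) := by
    rw [PySem.Int.mod_eq_emod_of_pos hnpos]
    exact Int.emod_lt_of_pos N hnpos
  have honeA : PySem.List.pyGetD (pvKmp S.toList T.toList (pvLpsa T.toList T.toList.length)) (-1) 0
      = (pvPcount (S.toList ++ S.toList) T.toList S.toList.length : Int) := by
    rw [hK1, pvMapRangeLast _ _ hn1, show S.toList.length - 1 + 1 = S.toList.length by omega,
      pvPcount_prefix S.toList T.toList S.toList.length le_rfl]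
  have htwoA : PySem.List.pyGetD (pvKmp (S.toList ++ S.toList) T.toList (pvLpsa T.toList T.toList.length)) (-1) 0
      = (pvPcount (S.toList ++ S.toList) T.toList (S.toList ++ S.toList).length : Int) := by
    rw [hK2, pvMapRangeLast _ _ hn2,
      show (S.toList ++ S.toList).length - 1 + 1 = (S.toList ++ S.toList).length by omega]
  have honeB : (pvPrefixSum (pvMarkEnds (S.toList ++ S.toList) T.toList T.toList.length
      (2 * S.toList.length + 1) (PySem.Chars.find (S.toList ++ S.toList) T.toList)
      (List.replicate (2 * S.toList.length) 0)) (2 * S.toList.length)).getD (S.toList.length - 1) 0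
      = (pvPcount (S.toList ++ S.toList) T.toList S.toList.length : Int) := by
    rw [show List.replicate (2 * S.toList.length) (0:Int)
        = List.replicate (S.toList.length + S.toList.length) 0 by congr 1; omega,
      show (2 * S.toList.length) = (S.toList ++ S.toList).length by omega,
      ← List.length_append (as := S.toList), hPC, pvMapRangeGetD _ _ _ (by omega),
      show S.toList.length - 1 + 1 = S.toList.length by omega]
  have htwoB : (pvPrefixSum (pvMarkEnds (S.toList ++ S.toList) T.toList T.toList.length
      (2 * S.toList.length + 1) (PySem.Chars.find (S.toList ++ S.toList) T.toList)
      (List.replicate (2 * S.toList.length) 0)) (2 * S.toList.length)).getD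
        (2 * S.toList.length - 1) 0
      = (pvPcount (S.toList ++ S.toList) T.toList (S.toList ++ S.toList).length : Int) := by
    rw [show List.replicate (2 * S.toList.length) (0:Int)
        = List.replicate (S.toList.length + S.toList.length) 0 by congr 1; omega,
      show (2 * S.toList.length) = (S.toList ++ S.toList).length by omega,
      ← List.length_append (as := S.toList), hPC, pvMapRangeGetD _ _ _ (by omega),
      show (S.toList ++ S.toList).length - 1 + 1 = (S.toList ++ S.toList).length by omega]
  unfold Spec_count_occurrences_in_pyramid_row
  simp only [count_occurrences_in_pyramid_row, count_occurrences_in_pyramid_row_alt]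
  rw [honeA, htwoA]
  have hreplE : List.replicate (2 * S.toList.length) (0:Int)
      = List.replicate (S.toList.length + S.toList.length) 0 := by congr 1; omega
  by_cases hv : PySem.Int.floordiv N (S.toList.length : Int) ≠ 0
  · rw [if_pos hv, if_pos hv, honeB, htwoB]
    have hcA : PySem.List.pyGetD (pvKmp (S.toList ++ S.toList) T.toList (pvLpsa T.toList T.toList.length))
        ((S.toList.length : Int) - 1 + PySem.Int.mod N (S.toList.length : Int)) 0
        = (pvPcount (S.toList ++ S.toList) T.toList
            (S.toList.length + (PySem.Int.mod N (S.toList.length : Int)).toNat) : Int) := by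
      rw [hK2, show (S.toList.length : Int) - 1 + PySem.Int.mod N (S.toList.length : Int)
          = ((S.toList.length - 1 + (PySem.Int.mod N (S.toList.length : Int)).toNat : Nat) : Int) by omega]
      rw [PySem.List.pyGetD_natCast, pvMapRangeGetD _ _ _ (by omega),
        show S.toList.length - 1 + (PySem.Int.mod N (S.toList.length : Int)).toNat + 1
          = S.toList.length + (PySem.Int.mod N (S.toList.length : Int)).toNat by omega]
    have hdA : PySem.List.pyGetD (pvKmp (S.toList ++ S.toList) T.toList (pvLpsa T.toList T.toList.length))
        ((S.toList.length : Int) - 1) 0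
        = (pvPcount (S.toList ++ S.toList) T.toList S.toList.length : Int) := by
      rw [hK2, show (S.toList.length : Int) - 1 = ((S.toList.length - 1 : Nat) : Int) by omega]
      rw [PySem.List.pyGetD_natCast, pvMapRangeGetD _ _ _ (by omega),
        show S.toList.length - 1 + 1 = S.toList.length by omega]
    have hcB : PySem.List.pyGetD (pvPrefixSum (pvMarkEnds (S.toList ++ S.toList) T.toList
        T.toList.length (2 * S.toList.length + 1)
        (PySem.Chars.find (S.toList ++ S.toList) T.toList)
        (List.replicate (2 * S.toList.length) 0)) (2 * S.toList.length))
        ((S.toList.length : Int) - 1 + PySem.Int.mod N (S.toList.length : Int)) 0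
        = (pvPcount (S.toList ++ S.toList) T.toList
            (S.toList.length + (PySem.Int.mod N (S.toList.length : Int)).toNat) : Int) := by
      rw [hreplE, show (2 * S.toList.length) = (S.toList ++ S.toList).length by omega,
        ← List.length_append (as := S.toList), hPC,
        show (S.toList.length : Int) - 1 + PySem.Int.mod N (S.toList.length : Int)
          = ((S.toList.length - 1 + (PySem.Int.mod N (S.toList.length : Int)).toNat : Nat) : Int) by omega,
        PySem.List.pyGetD_natCast, pvMapRangeGetD _ _ _ (by omega),
        show S.toList.length - 1 + (PySem.Int.mod N (S.toList.length : Int)).toNat + 1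
          = S.toList.length + (PySem.Int.mod N (S.toList.length : Int)).toNat by omega]
    rw [hcA, hdA, hcB]
  · rw [if_neg hv, if_neg hv]
    have hA : PySem.List.pyGetD (pvKmp (S.toList ++ S.toList) T.toList (pvLpsa T.toList T.toList.length))
        (PySem.Int.mod N (S.toList.length : Int) - 1) 0
        = PySem.List.pyGetD ((List.range (S.toList ++ S.toList).length).map
            (fun p => (pvPcount (S.toList ++ S.toList) T.toList (p+1) : Int)))
          (PySem.Int.mod N (S.toList.length : Int) - 1) 0 := by
      rw [hK2]
    have hB : PySem.List.pyGetD (pvPrefixSum (pvMarkEnds (S.toList ++ S.toList) T.toList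
        T.toList.length (2 * S.toList.length + 1)
        (PySem.Chars.find (S.toList ++ S.toList) T.toList)
        (List.replicate (2 * S.toList.length) 0)) (2 * S.toList.length))
        (PySem.Int.mod N (S.toList.length : Int) - 1) 0
        = PySem.List.pyGetD ((List.range (S.toList ++ S.toList).length).map
            (fun p => (pvPcount (S.toList ++ S.toList) T.toList (p+1) : Int)))
          (PySem.Int.mod N (S.toList.length : Int) - 1) 0 := by
      rw [hreplE, show (2 * S.toList.length) = (S.toList ++ S.toList).length by omega,
        ← List.length_append (as := S.toList), hPC]
    rw [hA, hB]
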